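-- pv_equiv track=rewrite | github.com/maksymhonchar/Fun | Python/pyworkout/list_and_tuples/ex12_mod1.py | most_common_vowel_occurences
-- ===== SOURCE A (Python) =====
-- from collections import Counter
--
-- def most_common_vowel_occurences(
--     word: str
-- ) -> int:
--     vowels = {'a', 'o', 'i', 'e', 'u'}
--     word_as_vowels = ''.join(
--         [char for char in word if char.lower() in vowels ]
--     )
--
--     if len(word_as_vowels) == 0:
--         return 0
--     else:
--         char, occurences = Counter(word_as_vowels).most_common(n=1)[0]
--         return occurences
-- ===== SOURCE B (Python) =====
-- def most_common_vowel_occurences(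
--     word: str
-- ) -> int:
--     return max(word.count(v) for v in 'aeiouAEIOU')
-- ===== Notes on version B (the rewrite author's own statement) =====
-- stated objective: simpler
-- what changed: Replaces the filtered-string build plus Counter table and most_common with a single max over ten targeted per-vowel str.count scans of the word.
import Mathlib
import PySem

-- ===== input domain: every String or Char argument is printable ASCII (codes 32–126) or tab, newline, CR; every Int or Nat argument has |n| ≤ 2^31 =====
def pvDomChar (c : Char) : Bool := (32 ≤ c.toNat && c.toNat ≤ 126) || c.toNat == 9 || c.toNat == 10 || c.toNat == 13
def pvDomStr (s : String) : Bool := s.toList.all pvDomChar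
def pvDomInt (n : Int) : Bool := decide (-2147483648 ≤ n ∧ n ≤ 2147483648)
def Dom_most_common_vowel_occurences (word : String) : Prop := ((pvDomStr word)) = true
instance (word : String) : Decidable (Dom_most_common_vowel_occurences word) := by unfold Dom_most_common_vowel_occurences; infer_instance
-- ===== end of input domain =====

-- B replaces A's filtered string + Counter + most_common with one max over the ten per-vowel scans word.count(v), v in 'aeiouAEIOU' (simpler; same return value everywhere).


-- ===== PORT A =====
-- Counter(s).most_common(1)[0]: CPython's most_common(1) is heapq.nlargest(1, items, key=count)
-- = [max(items, key=count)], the FIRST count-maximal item — ported as PySem.List.max? over the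
-- counter's items; the 'none' branch is unreachable (the filtered list is nonempty in that branch).
def most_common_vowel_occurences (word : String) : Int :=
  let vowels : PySem.Set Char := PySem.Set.ofList ['a', 'o', 'i', 'e', 'u']
  let word_as_vowels : List Char :=
    word.toList.filter (fun char => decide (PySem.Chars.lowerChar char ∈ vowels))
  if word_as_vowels.length = 0 then 0
  else
    match PySem.List.max? (PySem.Dict.counter word_as_vowels).items (fun p => p.2) with
    | some (_, occurences) => occurences
    | none => 0

-- ===== PORT B =====
-- word.count(v) for a single character v is the character count — exact.
def most_common_vowel_occurences_alt (word : String) : Int :=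
  match PySem.List.max? ("aeiouAEIOU".toList.map (fun v => (word.toList.count v : Int))) (fun x => x) with
  | some m => m
  | none => 0

-- ===== PRECONDITION & SPEC =====
def Spec_most_common_vowel_occurences (word : String) (out : Int) : Prop := out = most_common_vowel_occurences_alt word
instance (word : String) (out : Int) : Decidable (Spec_most_common_vowel_occurences word out) := by unfold Spec_most_common_vowel_occurences; infer_instance

-- ===== CLAIM (what is proved, stated in full; the proofs are below) =====
def Claim_equal_most_common_vowel_occurences : Prop := ∀ (word : String), Dom_most_common_vowel_occurences word → Spec_most_common_vowel_occurences word (most_common_vowel_occurences word)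

-- ===== LEMMAS AND PROOFS =====

theorem char_eq_iff_toNat (c ch : Char) : c = ch ↔ c.toNat = ch.toNat := by
  constructor
  · intro h; rw [h]
  · intro h; exact Char.ext (UInt32.toNat_inj.mp h)

-- A char lowercases into the five lowercase vowels iff it is one of the ten vowel characters.
theorem lower_mem_iff (c : Char) :
    (PySem.Chars.lowerChar c ∈ (['a','o','i','e','u'] : List Char)) ↔ c ∈ ("aeiouAEIOU".toList) := by
  have hlist : "aeiouAEIOU".toList = ['a','e','i','o','u','A','E','I','O','U'] := rfl
  rw [hlist]
  have e1 : 'a'.toNat = 97 := rfl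
  have e2 : 'e'.toNat = 101 := rfl
  have e3 : 'i'.toNat = 105 := rfl
  have e4 : 'o'.toNat = 111 := rfl
  have e5 : 'u'.toNat = 117 := rfl
  have f1 : 'A'.toNat = 65 := rfl
  have f2 : 'E'.toNat = 69 := rfl
  have f3 : 'I'.toNat = 73 := rfl
  have f4 : 'O'.toNat = 79 := rfl
  have f5 : 'U'.toNat = 85 := rfl
  simp only [PySem.Chars.lowerChar, PySem.Chars.isupper, List.mem_cons, List.not_mem_nil, or_false]
  by_cases h : ('A' ≤ c) ∧ (c ≤ 'Z')
  · simp only [h.1, h.2, decide_true, Bool.and_self, if_true]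
    have h65 : 65 ≤ c.toNat := h.1
    have h90 : c.toNat ≤ 90 := h.2
    have hvalid : (c.toNat + 32).isValidChar := Or.inl (by omega)
    have htn : (Char.ofNat (c.toNat + 32)).toNat = c.toNat + 32 := by
      rw [Char.toNat_ofNat, if_pos hvalid]
    simp only [char_eq_iff_toNat, htn, e1, e2, e3, e4, e5, f1, f2, f3, f4, f5]
    omega
  · rw [if_neg (by simpa using h)]
    have h' : ¬(65 ≤ c.toNat ∧ c.toNat ≤ 90) := fun hc => h ⟨hc.1, hc.2⟩
    simp only [char_eq_iff_toNat, e1, e2, e3, e4, e5, f1, f2, f3, f4, f5]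
    omega

-- A's filter test holds iff the char is one of the ten vowel characters.
theorem filter_test_iff (c : Char) :
    (decide (PySem.Chars.lowerChar c ∈ PySem.Set.ofList (['a','o','i','e','u'] : List Char)) = true)
      ↔ c ∈ ("aeiouAEIOU".toList) := by
  rw [decide_eq_true_eq, PySem.Set.mem_ofList]
  exact lower_mem_iff c

-- ===== VERDICT (by name: the statement is the Claim_ definition above) =====
theorem most_common_vowel_occurences_spec : Claim_equal_most_common_vowel_occurences := by
  intro word _
  unfold Spec_most_common_vowel_occurences
  unfold most_common_vowel_occurences most_common_vowel_occurences_alt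
  dsimp only
  obtain ⟨m, hm⟩ : ∃ m, PySem.List.max? ("aeiouAEIOU".toList.map (fun v => (word.toList.count v : Int))) (fun x => x) = some m := by
    cases hc : PySem.List.max? ("aeiouAEIOU".toList.map (fun v => (word.toList.count v : Int))) (fun x => x) with
    | none => simp [PySem.List.max?_eq_none_iff] at hc
    | some m => exact ⟨m, rfl⟩
  rw [hm]
  obtain ⟨v, hv10, hvm⟩ := List.mem_map.mp (PySem.List.max?_mem hm)
  have hmax := PySem.List.max?_isMax hm
  set F := word.toList.filter (fun char => decide (PySem.Chars.lowerChar char ∈ PySem.Set.ofList (['a','o','i','e','u'] : List Char))) with hFdef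
  by_cases hF : F.length = 0
  · rw [if_pos hF]
    have hFnil : F = [] := List.length_eq_zero_iff.mp hF
    -- every vowel count is 0
    have hzero : ∀ u ∈ "aeiouAEIOU".toList, word.toList.count u = 0 := by
      intro u hu
      by_contra hne
      have humem : u ∈ word.toList := List.count_pos_iff.mp (Nat.pos_of_ne_zero hne)
      have : u ∈ F := List.mem_filter.mpr ⟨humem, (filter_test_iff u).mpr hu⟩
      rw [hFnil] at this
      exact absurd this (List.not_mem_nil)
    rw [← hvm, hzero v hv10]
    rfl
  · rw [if_neg hF]
    have hFne : F ≠ [] := fun h => hF (by rw [h]; rfl)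
    -- A's max? over the counter items is some (k, occ)
    have hitems : (PySem.Dict.counter F).items
        = (PySem.Set.ofList F).map (fun k => (k, (F.count k : Int))) := by
      simpa using PySem.Dict.items_counter F
    obtain ⟨x, hxF⟩ := List.exists_mem_of_ne_nil F hFne
    have hitne : (PySem.Dict.counter F).items ≠ [] := by
      rw [hitems]
      intro h
      have : x ∈ PySem.Set.ofList F := (PySem.Set.mem_ofList F x).mpr hxF
      rw [List.map_eq_nil_iff.mp h] at this
      exact absurd this (List.not_mem_nil)
    obtain ⟨pr, hpr⟩ : ∃ pr, PySem.List.max? (PySem.Dict.counter F).items (fun p => p.2) = some pr := by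
      cases hc : PySem.List.max? (PySem.Dict.counter F).items (fun p => p.2) with
      | none => exact absurd ((PySem.List.max?_eq_none_iff _ _).mp hc) hitne
      | some pr => exact ⟨pr, rfl⟩
    rw [hpr]
    obtain ⟨k, occ⟩ := pr
    dsimp only
    have hprmem := PySem.List.max?_mem hpr
    rw [hitems] at hprmem
    obtain ⟨k0, hk0, hk0eq⟩ := List.mem_map.mp hprmem
    obtain ⟨rfl, hocc⟩ : k0 = k ∧ occ = (F.count k0 : Int) := by
      cases hk0eq; exact ⟨rfl, rfl⟩
    have hkF : k0 ∈ F := (PySem.Set.mem_ofList F k0).mp hk0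
    have hkfilter := List.mem_filter.mp hkF
    have hk10 : k0 ∈ "aeiouAEIOU".toList := (filter_test_iff k0).mp hkfilter.2
    have hcntk : F.count k0 = word.toList.count k0 := List.count_filter hkfilter.2
    have hAmax := PySem.List.max?_isMax hpr
    -- occ ≤ m
    have h1 : occ ≤ m := by
      rw [hocc, hcntk]
      exact hmax _ (List.mem_map.mpr ⟨k0, hk10, rfl⟩)
    -- m ≤ occ
    have h2 : m ≤ occ := by
      have hpv : (decide (PySem.Chars.lowerChar v ∈ PySem.Set.ofList (['a','o','i','e','u'] : List Char))) = true :=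
        (filter_test_iff v).mpr hv10
      have hcntv : F.count v = word.toList.count v := List.count_filter hpv
      by_cases hvF : v ∈ F
      · have hmemit : (v, (F.count v : Int)) ∈ (PySem.Dict.counter F).items := by
          rw [hitems]
          exact List.mem_map.mpr ⟨v, (PySem.Set.mem_ofList F v).mpr hvF, rfl⟩
        have := hAmax _ hmemit
        dsimp only at this
        rw [← hvm, ← hcntv]
        exact this
      · have hv0 : word.toList.count v = 0 := by
          by_contra hne
          have humem : v ∈ word.toList := List.count_pos_iff.mp (Nat.pos_of_ne_zero hne)
          exact hvF (List.mem_filter.mpr ⟨humem, hpv⟩)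
        rw [← hvm, hv0, hocc]
        exact Int.natCast_nonneg _
    exact le_antisymm h1 h2
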